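-- pv_equiv track=rewrite | github.com/NHMDenmark/Mass-Digitizer | Species-Web/formatDataForSpecify.py | parse_accepted_data
-- ===== SOURCE A (Python) =====
-- def parse_accepted_data(row):
--     accepted = row.get('accepted')
--
--     if not isinstance(accepted, str) or not accepted.strip():
--         # If 'accepted' is empty or not a valid string, return None for all fields
--         row['accepted_genus'] = None
--         row['accepted_species'] = None
--         row['accepted_subspecies'] = None
--         row['accepted_variety'] = None
--         return row
--
--     # Split the accepted name into words
--     parts = accepted.split()
--
--     # The first word (capitalized) is always the genus
--     row['accepted_genus'] = parts[0] if parts[0][0].isupper() else None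
--
--     # Create species, subspecies, and variety columns
--     row['accepted_species'] = None
--     row['accepted_subspecies'] = None
--     row['accepted_variety'] = None
--
--     # Parse the rest of the string
--     species_parts = []
--     subspecies_parts = []
--     variety_parts = []
--
--     i = 1
--     while i < len(parts):
--         if parts[i] == 'subsp.':
--             # Parse subspecies starting from the next word
--             i += 1
--             while i < len(parts) and parts[i] != 'var.':
--                 subspecies_parts.append(parts[i])
--                 i += 1
--         elif parts[i] == 'var.':
--             # Parse variety starting from the next word
--             i += 1
--             while i < len(parts):
--                 variety_parts.append(parts[i])
--                 i += 1
--         elif parts[i][0].islower():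
--             # Add to species if it's lowercase and not part of subspecies or variety
--             species_parts.append(parts[i])
--             i += 1
--         else:
--             i += 1  # Skip unexpected tokens
--
--     # Assign parsed values to correct taxonomic rank
--     row['accepted_species'] = ' '.join(species_parts) if species_parts else None
--     row['accepted_subspecies'] = ' '.join(subspecies_parts) if subspecies_parts else None
--     row['accepted_variety'] = ' '.join(variety_parts) if variety_parts else None
--
--     return row
-- ===== SOURCE B (Python) =====
-- def parse_accepted_data(row):
--     accepted = row.get('accepted')
--     genus = species = subspecies = variety = None
--     if isinstance(accepted, str) and accepted.strip():
--         parts = accepted.split()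
--         genus = parts[0] if parts[0][0].isupper() else None
--         buckets = {'species': [], 'subspecies': [], 'variety': []}
--         mode = 'species'
--         for tok in parts[1:]:
--             if mode == 'species':
--                 if tok == 'subsp.':
--                     mode = 'subspecies'
--                 elif tok == 'var.':
--                     mode = 'variety'
--                 elif tok[0].islower():
--                     buckets['species'].append(tok)
--             elif mode == 'subspecies':
--                 if tok == 'var.':
--                     mode = 'variety'
--                 else:
--                     buckets['subspecies'].append(tok)
--             else:
--                 buckets['variety'].append(tok)
--         species = ' '.join(buckets['species']) if buckets['species'] else None
--         subspecies = ' '.join(buckets['subspecies']) if buckets['subspecies'] else None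
--         variety = ' '.join(buckets['variety']) if buckets['variety'] else None
--     row['accepted_genus'] = genus
--     row['accepted_species'] = species
--     row['accepted_subspecies'] = subspecies
--     row['accepted_variety'] = variety
--     return row
-- ===== Notes on version B (the rewrite author's own statement) =====
-- stated objective: simpler
-- what changed: Replaced the index-driven outer while with two nested inner while loops by a single left-to-right pass over the tokens with a mode state variable (species/subspecies/variety) and three buckets, and assigns each output field once instead of pre-setting it to None and overwriting.
import Mathlib
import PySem

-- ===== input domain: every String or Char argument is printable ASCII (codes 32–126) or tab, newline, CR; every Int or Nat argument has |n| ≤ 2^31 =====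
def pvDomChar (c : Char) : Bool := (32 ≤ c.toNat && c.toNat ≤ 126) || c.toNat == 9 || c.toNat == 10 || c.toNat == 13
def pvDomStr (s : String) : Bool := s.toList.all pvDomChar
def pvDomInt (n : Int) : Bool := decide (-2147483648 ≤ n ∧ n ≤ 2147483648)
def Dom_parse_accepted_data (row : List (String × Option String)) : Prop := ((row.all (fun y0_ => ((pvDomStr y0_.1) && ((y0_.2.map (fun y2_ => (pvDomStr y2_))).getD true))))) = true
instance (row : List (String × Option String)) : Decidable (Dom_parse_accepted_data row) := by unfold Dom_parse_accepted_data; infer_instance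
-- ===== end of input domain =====

-- B replaces A's index-driven outer/inner while loops by one mode-state pass and single assignments (objective: simpler).
-- Both programs mutate the input dict in place and return it; the theorems are about the returned dict (here: the same value).

-- shared primitives (exact Python dict semantics on an association list with unique keys:
-- d[k] = v overwrites the first occurrence in place, appends if absent; d.get(k) is the first match;
-- dict(row) keeps first-occurrence position with the last value)
def pvSetKey (l : List (String × Option String)) (k : String) (v : Option String) : List (String × Option String) :=
  match l with
  | [] => [(k, v)]
  | p :: rest => if p.1 = k then (k, v) :: rest else p :: pvSetKey rest k v

def pvGetKey (l : List (String × Option String)) (k : String) : Option (Option String) :=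
  match l with
  | [] => none
  | p :: rest => if p.1 = k then some p.2 else pvGetKey rest k

def pvToDict (row : List (String × Option String)) : List (String × Option String) :=
  row.foldl (fun d p => pvSetKey d p.1 p.2) []

-- tok[0].islower() / tok[0].isupper() on a nonempty token (the default is unreachable: split() tokens are nonempty)
def pvFirstIsLower (t : String) : Bool :=
  match PySem.Str.pyGet? t 0 with
  | some c => PySem.Chars.islower c
  | none => false

def pvFirstIsUpper (t : String) : Bool :=
  match PySem.Str.pyGet? t 0 with
  | some c => PySem.Chars.isupper c
  | none => false

-- ===== PORT A =====
-- inner 'while i < len(parts): variety_parts.append(parts[i]); i += 1'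
def pvVarLoopA : List String → List String
  | [] => []
  | t :: ts => t :: pvVarLoopA ts

-- inner 'while i < len(parts) and parts[i] != "var.": subspecies_parts.append(parts[i]); i += 1'
-- returns (the appended tokens, the remaining suffix starting at 'var.' or [])
def pvSubspLoopA : List String → List String × List String
  | [] => ([], [])
  | t :: ts => if t = "var." then ([], t :: ts) else
      let r := pvSubspLoopA ts; (t :: r.1, r.2)

-- needed by pvOuterA's termination proof
theorem pvSubspLoopA_len (ts : List String) : (pvSubspLoopA ts).2.length ≤ ts.length := by
  induction ts with
  | nil => simp [pvSubspLoopA]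
  | cons t ts ih =>
      simp only [pvSubspLoopA]
      split
      · simp
      · simpa using Nat.le_succ_of_le ih

-- the outer 'while i < len(parts)' dispatch over the suffix of parts starting at index i
def pvOuterA : List String → List String × List String × List String
  | [] => ([], [], [])
  | t :: ts =>
      if t = "subsp." then
        let p := pvSubspLoopA ts
        let r := pvOuterA p.2
        (r.1, p.1 ++ r.2.1, r.2.2)
      else if t = "var." then ([], [], pvVarLoopA ts)
      else if pvFirstIsLower t then
        let r := pvOuterA ts
        (t :: r.1, r.2)
      else pvOuterA ts
termination_by l => l.length
decreasing_by
  · exact Nat.lt_succ_of_le (pvSubspLoopA_len ts)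
  · exact Nat.lt_succ_self _
  · exact Nat.lt_succ_self _

def parse_accepted_data (row : List (String × Option String)) : List (String × Option String) :=
  let d := pvToDict row
  match pvGetKey d "accepted" with
  | some (some s) =>
      if PySem.Str.strip s = "" then
        pvSetKey (pvSetKey (pvSetKey (pvSetKey d "accepted_genus" none) "accepted_species" none)
          "accepted_subspecies" none) "accepted_variety" none
      else
        let parts := PySem.Str.split₀ s
        let p0 := parts.headD ""   -- parts[0]; parts ≠ [] since accepted.strip() ≠ "", the default is unreachable
        let d1 := pvSetKey d "accepted_genus" (if pvFirstIsUpper p0 then some p0 else none)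
        let d2 := pvSetKey d1 "accepted_species" none
        let d3 := pvSetKey d2 "accepted_subspecies" none
        let d4 := pvSetKey d3 "accepted_variety" none
        let r := pvOuterA (parts.drop 1)   -- the while loop runs over parts[1:]
        let d5 := pvSetKey d4 "accepted_species" (if r.1 ≠ [] then some (PySem.Str.join " " r.1) else none)
        let d6 := pvSetKey d5 "accepted_subspecies" (if r.2.1 ≠ [] then some (PySem.Str.join " " r.2.1) else none)
        pvSetKey d6 "accepted_variety" (if r.2.2 ≠ [] then some (PySem.Str.join " " r.2.2) else none)
  | _ =>
      pvSetKey (pvSetKey (pvSetKey (pvSetKey d "accepted_genus" none) "accepted_species" none)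
        "accepted_subspecies" none) "accepted_variety" none

-- ===== PORT B =====
-- one step of B's single pass: state = (mode, species bucket, subspecies bucket, variety bucket)
def pvStepB (st : String × List String × List String × List String) (tok : String) :
    String × List String × List String × List String :=
  if st.1 = "species" then
    if tok = "subsp." then ("subspecies", st.2.1, st.2.2.1, st.2.2.2)
    else if tok = "var." then ("variety", st.2.1, st.2.2.1, st.2.2.2)
    else if pvFirstIsLower tok then (st.1, st.2.1 ++ [tok], st.2.2.1, st.2.2.2)
    else st
  else if st.1 = "subspecies" then
    if tok = "var." then ("variety", st.2.1, st.2.2.1, st.2.2.2)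
    else (st.1, st.2.1, st.2.2.1 ++ [tok], st.2.2.2)
  else (st.1, st.2.1, st.2.2.1, st.2.2.2 ++ [tok])

def pvJoinOrNone (l : List String) : Option String :=
  if l ≠ [] then some (PySem.Str.join " " l) else none

-- the four computed fields (genus, species, subspecies, variety); the row.get('accepted') value is
-- a str exactly when the lookup yields some (some s), i.e. when (…).join is some s
def pvFieldsB (s : String) : Option String × Option String × Option String × Option String :=
  if PySem.Str.strip s = "" then (none, none, none, none)
  else
    let parts := PySem.Str.split₀ s
    let p0 := parts.headD ""   -- parts[0]; nonempty as in A, default unreachable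
    let genus := if pvFirstIsUpper p0 then some p0 else none
    let st := (PySem.List.slice parts (some 1) none).foldl pvStepB
        ("species", ([] : List String), ([] : List String), ([] : List String))
    (genus, pvJoinOrNone st.2.1, pvJoinOrNone st.2.2.1, pvJoinOrNone st.2.2.2)

def parse_accepted_data_alt (row : List (String × Option String)) : List (String × Option String) :=
  let d := pvToDict row
  let fields := ((pvGetKey d "accepted").join.map pvFieldsB).getD (none, none, none, none)
  pvSetKey (pvSetKey (pvSetKey (pvSetKey d "accepted_genus" fields.1) "accepted_species" fields.2.1)
    "accepted_subspecies" fields.2.2.1) "accepted_variety" fields.2.2.2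

-- ===== PRECONDITION & SPEC =====
def Spec_parse_accepted_data (row : List (String × Option String)) (out : List (String × Option String)) : Prop := out = parse_accepted_data_alt row
instance (row : List (String × Option String)) (out : List (String × Option String)) : Decidable (Spec_parse_accepted_data row out) := by unfold Spec_parse_accepted_data; infer_instance

-- ===== CLAIM (what is proved, stated in full; the proofs are below) =====
def Claim_equal_parse_accepted_data : Prop := ∀ (row : List (String × Option String)), Dom_parse_accepted_data row → Spec_parse_accepted_data row (parse_accepted_data row)

-- ===== LEMMAS AND PROOFS =====

theorem pvStepB_species (sp ss vr : List String) (tok : String) :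
    pvStepB ("species", sp, ss, vr) tok =
      if tok = "subsp." then ("subspecies", sp, ss, vr)
      else if tok = "var." then ("variety", sp, ss, vr)
      else if pvFirstIsLower tok then ("species", sp ++ [tok], ss, vr)
      else ("species", sp, ss, vr) := by
  simp [pvStepB]

theorem pvStepB_subsp (sp ss vr : List String) (tok : String) :
    pvStepB ("subspecies", sp, ss, vr) tok =
      if tok = "var." then ("variety", sp, ss, vr) else ("subspecies", sp, ss ++ [tok], vr) := by
  simp [pvStepB]

theorem pvStepB_var (sp ss vr : List String) (tok : String) :
    pvStepB ("variety", sp, ss, vr) tok = ("variety", sp, ss, vr ++ [tok]) := by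
  simp [pvStepB]

theorem pvSetKey_setKey (l : List (String × Option String)) (k : String) (v w : Option String) :
    pvSetKey (pvSetKey l k v) k w = pvSetKey l k w := by
  induction l with
  | nil => simp [pvSetKey]
  | cons p rest ih =>
      by_cases h : p.1 = k <;> simp [pvSetKey, h, ih]

theorem pvHasKey_setKey_self (l : List (String × Option String)) (k : String) (v : Option String) :
    k ∈ (pvSetKey l k v).map Prod.fst := by
  induction l with
  | nil => simp [pvSetKey]
  | cons p rest ih =>
      by_cases h : p.1 = k <;> simp [pvSetKey, h, ih]

theorem pvHasKey_setKey_mono (l : List (String × Option String)) (k k' : String) (w : Option String)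
    (h : k ∈ l.map Prod.fst) : k ∈ (pvSetKey l k' w).map Prod.fst := by
  induction l with
  | nil => simp at h
  | cons p rest ih =>
      by_cases h1 : p.1 = k'
      · rcases (by simpa using h) with hk | hk
        · simp [pvSetKey, h1]
          left; rw [hk, h1]
        · simp [pvSetKey, h1]
          right; simpa using hk
      · rcases (by simpa using h) with hk | hk
        · simp [pvSetKey, h1, hk]
        · simp [pvSetKey, h1]
          right; simpa using ih (by simpa using hk)

-- setKey at an already-present key commutes with setKey at a different key
theorem pvSetKey_comm_of_mem (l : List (String × Option String)) (k k' : String) (v w : Option String)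
    (hne : k ≠ k') (hmem : k ∈ l.map Prod.fst) :
    pvSetKey (pvSetKey l k' w) k v = pvSetKey (pvSetKey l k v) k' w := by
  induction l with
  | nil => simp at hmem
  | cons p rest ih =>
      by_cases h1 : p.1 = k'
      · have h2 : p.1 ≠ k := fun h => hne (h.symm.trans h1)
        simp [pvSetKey, h1, Ne.symm hne]
      · by_cases h2 : p.1 = k
        · simp [pvSetKey, h2, hne]
        · have hmem' : k ∈ rest.map Prod.fst := by
            rcases (by simpa using hmem) with hk | hk
            · exact absurd hk.symm h2
            · simpa using hk
          simp [pvSetKey, h1, h2, ih hmem']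

-- A pre-sets the three fields to None and later overwrites them; the net dict is the single-assignment dict.
theorem pvSeven_eq_four (d : List (String × Option String)) (x y z : Option String) :
    pvSetKey (pvSetKey (pvSetKey (pvSetKey (pvSetKey (pvSetKey d "accepted_species" none)
        "accepted_subspecies" none) "accepted_variety" none) "accepted_species" x)
        "accepted_subspecies" y) "accepted_variety" z
    = pvSetKey (pvSetKey (pvSetKey d "accepted_species" x) "accepted_subspecies" y) "accepted_variety" z := by
  have mS1 : "accepted_species" ∈ (pvSetKey d "accepted_species" none).map Prod.fst :=
    pvHasKey_setKey_self _ _ _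
  have mS2 := pvHasKey_setKey_mono _ _ "accepted_subspecies" none mS1
  rw [pvSetKey_comm_of_mem _ "accepted_species" "accepted_variety" x none (by decide) mS2]
  rw [pvSetKey_comm_of_mem _ "accepted_species" "accepted_subspecies" x none (by decide) mS1]
  rw [pvSetKey_setKey]
  have mU1 : "accepted_subspecies" ∈
      (pvSetKey (pvSetKey d "accepted_species" x) "accepted_subspecies" none).map Prod.fst :=
    pvHasKey_setKey_self _ _ _
  rw [pvSetKey_comm_of_mem _ "accepted_subspecies" "accepted_variety" y none (by decide) mU1]
  rw [pvSetKey_setKey, pvSetKey_setKey]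

theorem pvFoldB_var (ts : List String) (sp ss vr : List String) :
    ts.foldl pvStepB ("variety", sp, ss, vr) = ("variety", sp, ss, vr ++ pvVarLoopA ts) := by
  induction ts generalizing vr with
  | nil => simp [pvVarLoopA]
  | cons t ts ih => simp [pvVarLoopA, pvStepB_var, ih]

theorem pvFoldB_subsp (ts : List String) (sp ss vr : List String) :
    ts.foldl pvStepB ("subspecies", sp, ss, vr)
      = ((pvSubspLoopA ts).2).foldl pvStepB ("subspecies", sp, ss ++ (pvSubspLoopA ts).1, vr) := by
  induction ts generalizing ss with
  | nil => simp [pvSubspLoopA]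
  | cons t ts ih =>
      by_cases h : t = "var."
      · simp [pvSubspLoopA, h, pvStepB_subsp]
      · simp [pvSubspLoopA, h, pvStepB_subsp, ih (ss ++ [t])]

theorem pvSubspLoopA_shape (ts : List String) :
    (pvSubspLoopA ts).2 = [] ∨ ∃ r, (pvSubspLoopA ts).2 = "var." :: r := by
  induction ts with
  | nil => left; simp [pvSubspLoopA]
  | cons t ts ih =>
      by_cases h : t = "var."
      · right; exact ⟨ts, by simp [pvSubspLoopA, h]⟩
      · simpa [pvSubspLoopA, h] using ih

theorem pvFoldB_species (ts : List String) : ∀ (sp ss vr : List String),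
    (ts.foldl pvStepB ("species", sp, ss, vr)).2
      = (sp ++ (pvOuterA ts).1, ss ++ (pvOuterA ts).2.1, vr ++ (pvOuterA ts).2.2) := by
  induction ts using pvOuterA.induct with
  | case1 => intro sp ss vr; simp [pvOuterA]
  | case2 ts a ih =>
      intro sp ss vr
      simp only [List.foldl_cons, pvStepB_species, if_true]
      rw [pvFoldB_subsp]
      rcases pvSubspLoopA_shape ts with hsh | ⟨r', hsh⟩
      · rw [hsh]
        simp [pvOuterA, hsh]
      · rw [hsh]
        simp only [List.foldl_cons, pvStepB_subsp, if_true]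
        rw [pvFoldB_var]
        simp [pvOuterA, hsh]
  | case3 ts h =>
      intro sp ss vr
      simp only [List.foldl_cons, pvStepB_species,
        if_neg (by decide : ¬("var." : String) = "subsp."), if_true]
      rw [pvFoldB_var]
      simp [pvOuterA]
  | case4 t ts h1 h2 h3 ih =>
      intro sp ss vr
      simp only [List.foldl_cons, pvStepB_species, if_neg h1, if_neg h2, if_pos h3]
      rw [ih]
      simp [pvOuterA, h1, h2, h3]
  | case5 t ts h1 h2 h3 ih =>
      intro sp ss vr
      simp only [List.foldl_cons, pvStepB_species, if_neg h1, if_neg h2, if_neg h3]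
      rw [ih]
      simp [pvOuterA, h1, h2, h3]

-- ===== VERDICT (by name: the statement is the Claim_ definition above) =====
theorem parse_accepted_data_spec : Claim_equal_parse_accepted_data := by
  intro row _
  unfold Spec_parse_accepted_data parse_accepted_data parse_accepted_data_alt
  cases hacc : pvGetKey (pvToDict row) "accepted" with
  | none => simp [hacc, Option.join]
  | some o =>
      cases o with
      | none => simp [hacc, Option.join]
      | some s =>
          by_cases hs : PySem.Str.strip s = ""
          · simp [hacc, Option.join, pvFieldsB, hs]
          · have hslice : PySem.List.slice (PySem.Str.split₀ s) (some 1) none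
                = (PySem.Str.split₀ s).drop 1 := by
              simpa using PySem.List.slice_from (PySem.Str.split₀ s) (by norm_num : (0:Int) ≤ 1)
            have hf := pvFoldB_species ((PySem.Str.split₀ s).drop 1) [] [] []
            simp only [hacc, Option.join, Option.bind, id, Option.map_some, Option.getD_some]
            simp only [pvFieldsB, if_neg hs, hslice, hf, List.nil_append, pvJoinOrNone]
            exact pvSeven_eq_four _ _ _ _
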